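-- pv_equiv track=rewrite | github.com/julienc91/adventofcode | 2016/07/07.py | is_ssl
-- ===== SOURCE A (Python) =====
-- def is_ssl(address: str) -> bool:
--     bracket_level = 0
--     i = 0
--     patterns_in_brackets: set[str] = set()
--     patterns_outside_brackets: set[str] = set()
--
--     while i < len(address):
--         c = address[i]
--         if c == "[":
--             bracket_level += 1
--         elif c == "]":
--             bracket_level -= 1
--         else:
--             block = address[i : i + 3]
--             if len(block) < 3:
--                 break
--             if block[0] == block[2] and block[0] != block[1]:
--                 if bracket_level > 0:
--                     patterns_in_brackets.add(block)
--                 else: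
--                     patterns_outside_brackets.add(f"{block[1]}{block[0]}{block[1]}")
--         i += 1
--     return bool(patterns_in_brackets & patterns_outside_brackets)
-- ===== SOURCE B (Python) =====
-- def is_ssl(address: str) -> bool:
--     n = len(address)
--     # prefix table: depth[i] = bracket level just before position i
--     depth = []
--     d = 0
--     for ch in address:
--         depth.append(d)
--         d += (ch == '[') - (ch == ']')
--
--     def aba(i):
--         a = address[i]
--         return a != '[' and a != ']' and a == address[i + 2] and a != address[i + 1]
--
--     # brute-force pair search (no sets, no intersection): for every ABA window that
--     # starts inside brackets, look for a matching BAB window outside brackets.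
--     for i in range(n - 2):
--         if depth[i] > 0 and aba(i):
--             for j in range(n - 2):
--                 if depth[j] <= 0 and aba(j) \
--                         and address[j] == address[i + 1] and address[j + 1] == address[i]:
--                     return True
--     return False
-- ===== Notes on version B (the rewrite author's own statement) =====
-- stated objective: alternative
-- what changed: Replaced A's single-pass set-collection-plus-intersection (two growing hash sets, final set intersection) by a brute-force pair search: precompute a bracket-depth table, then for each ABA window inside brackets scan all windows for a matching BAB window outside brackets and return True on the first match - no sets or intersection at all.
import Mathlib
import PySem

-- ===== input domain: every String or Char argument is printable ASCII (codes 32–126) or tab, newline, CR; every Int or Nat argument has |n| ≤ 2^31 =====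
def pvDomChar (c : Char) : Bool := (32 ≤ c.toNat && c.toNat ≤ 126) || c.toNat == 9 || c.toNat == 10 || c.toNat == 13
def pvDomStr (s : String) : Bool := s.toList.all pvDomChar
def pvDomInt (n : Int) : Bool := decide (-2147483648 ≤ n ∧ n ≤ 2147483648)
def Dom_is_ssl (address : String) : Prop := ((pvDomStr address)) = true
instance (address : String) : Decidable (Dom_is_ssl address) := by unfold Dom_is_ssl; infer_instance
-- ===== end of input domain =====

-- B replaces A's set-collection-plus-intersection by a brute-force pair search over a
-- precomputed bracket-depth table (alternative algorithm, not claimed faster).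

-- ===== PORT A =====
-- the while-loop: index i becomes the remaining suffix; break when the 3-char slice is short
def pvLoopA : List Char → Int → PySem.Set String → PySem.Set String →
    PySem.Set String × PySem.Set String
  | [], _, ins, outs => (ins, outs)
  | a :: rest, lvl, ins, outs =>
    if a = '[' then pvLoopA rest (lvl + 1) ins outs
    else if a = ']' then pvLoopA rest (lvl - 1) ins outs
    else
      match rest with
      | b :: c :: _ =>
        if a = c ∧ a ≠ b then
          if 0 < lvl then pvLoopA rest lvl (PySem.Set.add ins (String.ofList [a, b, c])) outs
          else pvLoopA rest lvl ins (PySem.Set.add outs (String.ofList [b, a, b]))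
        else pvLoopA rest lvl ins outs
      | _ => (ins, outs)   -- len(block) < 3: break

def is_ssl (address : String) : Bool :=
  let p := pvLoopA address.toList 0 PySem.Set.empty PySem.Set.empty
  !(PySem.Set.inter p.1 p.2).isEmpty

-- ===== PORT B =====
-- first loop of Source B: depth[i] = bracket level just before position i (prefix table)
def pvDepth : List Char → Int → List Int
  | [], _ => []
  | c :: rest, d =>
    d :: pvDepth rest (d + (if c = '[' then 1 else 0) - (if c = ']' then 1 else 0))

-- Source B's helper aba(i); Python's in-range indexing address[i] is cs.getD i ' ' here
-- (every call in Source B has i+2 < n, so the default is never read)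
def pvAba (cs : List Char) (i : Nat) : Bool :=
  decide (cs.getD i ' ' ≠ '[' ∧ cs.getD i ' ' ≠ ']' ∧
          cs.getD i ' ' = cs.getD (i + 2) ' ' ∧ cs.getD i ' ' ≠ cs.getD (i + 1) ' ')

def is_ssl_alt (address : String) : Bool :=
  let cs := address.toList
  let n := cs.length
  let depth := pvDepth cs 0
  (List.range (n - 2)).any fun i =>
    decide (0 < depth.getD i 0) && pvAba cs i &&
      (List.range (n - 2)).any fun j =>
        decide (depth.getD j 0 ≤ 0) && pvAba cs j &&
          decide (cs.getD j ' ' = cs.getD (i + 1) ' ' ∧ cs.getD (j + 1) ' ' = cs.getD i ' ')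

-- ===== PRECONDITION & SPEC =====
def Spec_is_ssl (address : String) (out : Bool) : Prop := out = is_ssl_alt address
instance (address : String) (out : Bool) : Decidable (Spec_is_ssl address out) := by
  unfold Spec_is_ssl; infer_instance

-- ===== CLAIM (what is proved, stated in full; the proofs are below) =====
def Claim_equal_is_ssl : Prop := ∀ (address : String), Dom_is_ssl address → Spec_is_ssl address (is_ssl address)

-- ===== LEMMAS AND PROOFS =====

-- the ABA strings A collects inside brackets (raw slice) at start level lvl, in order
def specI : List Char → Int → List String
  | [], _ => []
  | a :: rest, lvl =>
    let lvl' := if a = '[' then lvl + 1 else if a = ']' then lvl - 1 else lvl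
    match rest with
    | b :: c :: _ =>
      if a ≠ '[' ∧ a ≠ ']' ∧ a = c ∧ a ≠ b ∧ 0 < lvl then String.ofList [a, b, c] :: specI rest lvl'
      else specI rest lvl'
    | _ => specI rest lvl'

-- the normalized BAB strings collected outside brackets
def specO : List Char → Int → List String
  | [], _ => []
  | a :: rest, lvl =>
    let lvl' := if a = '[' then lvl + 1 else if a = ']' then lvl - 1 else lvl
    match rest with
    | b :: c :: _ =>
      if a ≠ '[' ∧ a ≠ ']' ∧ a = c ∧ a ≠ b ∧ ¬ 0 < lvl then String.ofList [b, a, b] :: specO rest lvl'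
      else specO rest lvl'
    | _ => specO rest lvl'

theorem specI_cons (a b c : Char) (t : List Char) (lvl : Int) :
    specI (a :: b :: c :: t) lvl =
      (if a ≠ '[' ∧ a ≠ ']' ∧ a = c ∧ a ≠ b ∧ 0 < lvl then [String.ofList [a, b, c]] else []) ++
        specI (b :: c :: t) (if a = '[' then lvl + 1 else if a = ']' then lvl - 1 else lvl) := by
  by_cases h : a ≠ '[' ∧ a ≠ ']' ∧ a = c ∧ a ≠ b ∧ 0 < lvl
  · rw [specI.eq_def]; simp [h]; try (split_ifs <;> simp)
  · rw [specI.eq_def]; simp [h]; try (split_ifs <;> simp)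

theorem specO_cons (a b c : Char) (t : List Char) (lvl : Int) :
    specO (a :: b :: c :: t) lvl =
      (if a ≠ '[' ∧ a ≠ ']' ∧ a = c ∧ a ≠ b ∧ ¬ 0 < lvl then [String.ofList [b, a, b]] else []) ++
        specO (b :: c :: t) (if a = '[' then lvl + 1 else if a = ']' then lvl - 1 else lvl) := by
  by_cases h : a ≠ '[' ∧ a ≠ ']' ∧ a = c ∧ a ≠ b ∧ ¬ 0 < lvl
  · rw [specO.eq_def]; simp [h]; try (split_ifs <;> simp)
  · rw [specO.eq_def]; simp [h]; try (split_ifs <;> simp)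

theorem mem_pvLoopA (cs : List Char) : ∀ (lvl : Int) (ins outs : PySem.Set String) (s : String),
    (s ∈ (pvLoopA cs lvl ins outs).1 ↔ s ∈ ins ∨ s ∈ specI cs lvl) ∧
    (s ∈ (pvLoopA cs lvl ins outs).2 ↔ s ∈ outs ∨ s ∈ specO cs lvl) := by
  induction cs with
  | nil => intro lvl ins outs s; simp [pvLoopA, specI, specO]
  | cons a rest ih =>
    intro lvl ins outs s
    have ihI : ∀ (lvl : Int) (ins outs : PySem.Set String) (s : String),
        s ∈ (pvLoopA rest lvl ins outs).1 ↔ s ∈ ins ∨ s ∈ specI rest lvl :=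
      fun l i o s => (ih l i o s).1
    have ihO : ∀ (lvl : Int) (ins outs : PySem.Set String) (s : String),
        s ∈ (pvLoopA rest lvl ins outs).2 ↔ s ∈ outs ∨ s ∈ specO rest lvl :=
      fun l i o s => (ih l i o s).2
    rcases rest with _ | ⟨b, _ | ⟨c, t⟩⟩
    · by_cases h1 : a = '[' <;> by_cases h2 : a = ']' <;>
        simp [pvLoopA, specI, specO, h1, h2]
    · by_cases h1 : a = '[' <;> by_cases h2 : a = ']' <;>
        simp [pvLoopA, specI, specO, h1, h2]
    · rw [pvLoopA.eq_def, specI_cons, specO_cons]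
      by_cases h3 : a = c
      · subst h3
        by_cases h1 : a = '['
        · subst h1; simp [ihI, ihO]
        · by_cases h2 : a = ']'
          · subst h2; simp [ihI, ihO]
          · by_cases h4 : a = b
            · subst h4
              by_cases h5 : 0 < lvl <;>
                simp [h1, h2, h5, ihI, ihO, PySem.Set.mem_add] <;> tauto
            · by_cases h5 : 0 < lvl <;>
                simp [h1, h2, h4, h5, ihI, ihO, PySem.Set.mem_add] <;> tauto
      · by_cases h1 : a = '['
        · subst h1; simp [ihI, ihO]
        · by_cases h2 : a = ']'
          · subst h2; simp [ihI, ihO]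
          · by_cases h5 : 0 < lvl <;>
              simp [h1, h2, h3, h5, ihI, ihO, PySem.Set.mem_add] <;> tauto

theorem pvAba_succ (x : Char) (cs : List Char) (i : Nat) : pvAba (x :: cs) (i + 1) = pvAba cs i := by
  simp [pvAba]

-- index characterization of the inside-ABA list
theorem specI_char (cs : List Char) : ∀ (lvl : Int) (s : String),
    s ∈ specI cs lvl ↔
      ∃ i, i + 2 < cs.length ∧ pvAba cs i = true ∧
        0 < (pvDepth cs lvl).getD i 0 ∧
        s = String.ofList [cs.getD i ' ', cs.getD (i + 1) ' ', cs.getD i ' '] := by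
  induction cs with
  | nil => intro lvl s; simp [specI]
  | cons a rest ih =>
    intro lvl s
    rcases rest with _ | ⟨b, _ | ⟨c, t⟩⟩
    · simp [specI]
    · simp [specI]
    · have hd : pvDepth (a :: b :: c :: t) lvl =
          lvl :: pvDepth (b :: c :: t)
            (lvl + (if a = '[' then 1 else 0) - (if a = ']' then 1 else 0)) := rfl
      have hlvl : (lvl + (if a = '[' then 1 else 0) - (if a = ']' then 1 else 0)) =
          (if a = '[' then lvl + 1 else if a = ']' then lvl - 1 else lvl) := by
        split_ifs <;> simp_all <;> omega
      rw [specI_cons, List.mem_append, ih]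
      constructor
      · rintro (hhead | ⟨k, hk, hab, hdep, hs⟩)
        · by_cases h : a ≠ '[' ∧ a ≠ ']' ∧ a = c ∧ a ≠ b ∧ 0 < lvl
          · rw [if_pos h, List.mem_singleton] at hhead
            refine ⟨0, by simp, ?_, ?_, ?_⟩
            · simp [pvAba, h.1, h.2.1, h.2.2.2.1]
              exact h.2.2.1
            · simp [hd]; exact h.2.2.2.2
            · simpa [← h.2.2.1] using hhead
          · rw [if_neg h] at hhead; simp at hhead
        · exact ⟨k + 1, by simpa using hk, by simpa [pvAba_succ] using hab,
            by simpa [hd, hlvl] using hdep, by simpa using hs⟩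
      · rintro ⟨i, hi, hab, hdep, hs⟩
        cases i with
        | zero =>
          left
          simp [pvAba] at hab
          simp [hd] at hdep
          rw [if_pos ⟨hab.1, hab.2.1, hab.2.2.1, hab.2.2.2, hdep⟩, List.mem_singleton]
          simpa [← hab.2.2.1] using hs
        | succ k =>
          right
          exact ⟨k, by simpa using hi, by simpa [pvAba_succ] using hab,
            by simpa [hd, hlvl] using hdep, by simpa using hs⟩

-- index characterization of the outside-BAB list
theorem specO_char (cs : List Char) : ∀ (lvl : Int) (s : String),
    s ∈ specO cs lvl ↔
      ∃ i, i + 2 < cs.length ∧ pvAba cs i = true ∧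
        (pvDepth cs lvl).getD i 0 ≤ 0 ∧
        s = String.ofList [cs.getD (i + 1) ' ', cs.getD i ' ', cs.getD (i + 1) ' '] := by
  induction cs with
  | nil => intro lvl s; simp [specO]
  | cons a rest ih =>
    intro lvl s
    rcases rest with _ | ⟨b, _ | ⟨c, t⟩⟩
    · simp [specO]
    · simp [specO]
    · have hd : pvDepth (a :: b :: c :: t) lvl =
          lvl :: pvDepth (b :: c :: t)
            (lvl + (if a = '[' then 1 else 0) - (if a = ']' then 1 else 0)) := rfl
      have hlvl : (lvl + (if a = '[' then 1 else 0) - (if a = ']' then 1 else 0)) =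
          (if a = '[' then lvl + 1 else if a = ']' then lvl - 1 else lvl) := by
        split_ifs <;> simp_all <;> omega
      rw [specO_cons, List.mem_append, ih]
      constructor
      · rintro (hhead | ⟨k, hk, hab, hdep, hs⟩)
        · by_cases h : a ≠ '[' ∧ a ≠ ']' ∧ a = c ∧ a ≠ b ∧ ¬ 0 < lvl
          · rw [if_pos h, List.mem_singleton] at hhead
            refine ⟨0, by simp, ?_, ?_, ?_⟩
            · simp [pvAba, h.1, h.2.1, h.2.2.2.1]
              exact h.2.2.1
            · simp [hd]; omega
            · simpa using hhead
          · rw [if_neg h] at hhead; simp at hhead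
        · exact ⟨k + 1, by simpa using hk, by simpa [pvAba_succ] using hab,
            by simpa [hd, hlvl] using hdep, by simpa using hs⟩
      · rintro ⟨i, hi, hab, hdep, hs⟩
        cases i with
        | zero =>
          left
          simp [pvAba] at hab
          simp [hd] at hdep
          rw [if_pos ⟨hab.1, hab.2.1, hab.2.2.1, hab.2.2.2, by omega⟩, List.mem_singleton]
          simpa using hs
        | succ k =>
          right
          exact ⟨k, by simpa using hi, by simpa [pvAba_succ] using hab,
            by simpa [hd, hlvl] using hdep, by simpa using hs⟩

theorem not_isEmpty_eq (l : List String) : ((!l.isEmpty) = true) ↔ ∃ s, s ∈ l := by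
  cases l <;> simp

theorem ofList_triple_inj (a b a' b' : Char) :
    String.ofList [a, b, a] = String.ofList [b', a', b'] ↔ a = b' ∧ b = a' := by
  constructor
  · intro h
    have := congrArg String.toList h
    simp at this
    tauto
  · rintro ⟨rfl, rfl⟩; rfl

-- ===== VERDICT (by name: the statement is the Claim_ definition above) =====
theorem is_ssl_spec : Claim_equal_is_ssl := by
  intro address _
  unfold Spec_is_ssl is_ssl is_ssl_alt
  rw [Bool.eq_iff_iff, not_isEmpty_eq]
  simp only [List.any_eq_true, List.mem_range, Bool.and_eq_true, decide_eq_true_eq]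
  constructor
  · rintro ⟨s, hs⟩
    rw [PySem.Set.mem_inter] at hs
    have h := mem_pvLoopA address.toList 0 PySem.Set.empty PySem.Set.empty s
    rw [h.1, h.2] at hs
    simp only [PySem.Set.empty, List.not_mem_nil, false_or] at hs
    obtain ⟨hI, hO⟩ := hs
    rw [specI_char] at hI
    rw [specO_char] at hO
    obtain ⟨i, hi, habi, hdi, rfl⟩ := hI
    obtain ⟨j, hj, habj, hdj, hsj⟩ := hO
    rw [ofList_triple_inj] at hsj
    exact ⟨i, by omega, ⟨⟨hdi, habi⟩, j, by omega, ⟨hdj, habj⟩, hsj.2.symm, hsj.1.symm⟩⟩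
  · rintro ⟨i, hi, ⟨⟨hdi, habi⟩, j, hj, ⟨hdj, habj⟩, hji, hji'⟩⟩
    refine ⟨String.ofList [address.toList.getD i ' ', address.toList.getD (i + 1) ' ',
      address.toList.getD i ' '], ?_⟩
    rw [PySem.Set.mem_inter]
    have h := mem_pvLoopA address.toList 0 PySem.Set.empty PySem.Set.empty
      (String.ofList [address.toList.getD i ' ', address.toList.getD (i + 1) ' ',
        address.toList.getD i ' '])
    rw [h.1, h.2]
    simp only [PySem.Set.empty, List.not_mem_nil, false_or]
    constructor
    · rw [specI_char]
      exact ⟨i, by omega, habi, hdi, rfl⟩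
    · rw [specO_char]
      exact ⟨j, by omega, habj, hdj, by rw [ofList_triple_inj]; exact ⟨hji'.symm, hji.symm⟩⟩
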